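-- pv_equiv track=rewrite | github.com/OnYyon/EGE | PRO100EGE/task19-21/subtraction/task8.py | f
-- ===== SOURCE A (Python) =====
-- def f(x, c, win):
--     if x == 0:  # Указываем условие окончания игры
--         return c in win
--     if c > max(win):
--         return 0
--
--     moves = []  # Изначально список ходов пустой
--     if x - 2 >= 0:  # Если можем сделать ход -2
--         moves.append(f(x - 2, c + 1, win))  # То добавляем его в список moves
--     if x - 3 >= 0:  # Если можем сделать ход -3
--         moves.append(f(x - 3, c + 1, win))  # То добавляем его в список moves
--     if x // 2 >= 0:  # Если можем сделать ход //2
--         moves.append(f(x // 2, c + 1, win))  # То добавляем его в список moves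
--
--     if c % 2 != max(win) % 2:
--         return any(moves)  # Ходит наш игрок
--     else:
--         return all(moves)  # Ходит противник
-- ===== SOURCE B (Python) =====
-- def f(x, c, win):
--     # Memoized search over (x, c) states instead of A's plain exponential recursion.
--     maxw = max(win)
--     memo = {}
--
--     def g(x, c):
--         key = (x, c)
--         if key in memo:
--             return memo[key]
--         if x == 0:
--             r = c in win
--         elif c > maxw:
--             r = False
--         else:
--             nxt = []
--             if x - 2 >= 0:
--                 nxt.append(x - 2)
--             if x - 3 >= 0:
--                 nxt.append(x - 3)
--             if x // 2 >= 0: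
--                 nxt.append(x // 2)
--             vals = [g(y, c + 1) for y in nxt]
--             r = any(vals) if c % 2 != maxw % 2 else all(vals)
--         memo[key] = r
--         return r
--
--     return g(x, c)
-- ===== Notes on version B (the rewrite author's own statement) =====
-- stated objective: faster
-- what changed: B memoizes the game-search recursion on the (x, c) state in a dictionary (recursing over an explicit list of next states), so each state is evaluated once instead of A's plain exponential three-way recursion.
-- outside the precondition, e.g. on f(0, 1, []): A returns False, B raises ValueError; on f(1, 1, [0]): A returns 0, B returns False; on f(500, 0, [300]): A does not finish within the time limit, B returns False
import Mathlib
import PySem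

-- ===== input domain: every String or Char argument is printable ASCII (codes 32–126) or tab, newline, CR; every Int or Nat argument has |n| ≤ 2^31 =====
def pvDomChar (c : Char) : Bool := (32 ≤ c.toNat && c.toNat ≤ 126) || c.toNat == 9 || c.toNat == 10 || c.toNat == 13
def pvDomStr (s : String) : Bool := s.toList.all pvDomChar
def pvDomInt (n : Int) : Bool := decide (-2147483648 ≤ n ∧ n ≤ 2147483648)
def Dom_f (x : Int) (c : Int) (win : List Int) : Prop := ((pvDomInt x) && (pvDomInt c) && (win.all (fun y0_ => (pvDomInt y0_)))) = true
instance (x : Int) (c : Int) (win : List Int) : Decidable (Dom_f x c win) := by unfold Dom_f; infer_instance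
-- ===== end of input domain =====

-- B memoizes the recursion on the (x, c) state so each state is evaluated once instead of A's
-- plain exponential three-way recursion.

-- ===== PORT A =====
-- max(win) as the Python computes it (first maximal element; default irrelevant: win = [] is outside Pre_f)
def pymaxI (win : List Int) : Int := (PySem.List.max? win (fun y => y)).getD 0

-- A's 'return 0' (Python's falsy int) is the Bool false here
def f (x : Int) (c : Int) (win : List Int) : Bool :=
  if x = 0 then win.contains c
  else if _hc : c > pymaxI win then false
  else
    let moves : List Bool :=
      (if x - 2 ≥ 0 then [f (x - 2) (c + 1) win] else []) ++
      (if x - 3 ≥ 0 then [f (x - 3) (c + 1) win] else []) ++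
      (if PySem.Int.floordiv x 2 ≥ 0 then [f (PySem.Int.floordiv x 2) (c + 1) win] else [])
    if PySem.Int.mod c 2 ≠ PySem.Int.mod (pymaxI win) 2 then moves.any id else moves.all id
termination_by (pymaxI win + 1 - c).toNat
decreasing_by all_goals (simp_wf; omega)

-- ===== PORT B =====
mutual
-- g of Source B: memoized evaluation of one state; returns (value, updated memo)
def fAltGo (maxw : Int) (win : List Int) (x : Int) (c : Int)
    (memo : PySem.Dict (Int × Int) Bool) : Bool × PySem.Dict (Int × Int) Bool :=
  match PySem.Dict.get? memo (x, c) with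
  | some v => (v, memo)
  | none =>
    if x = 0 then
      let r := win.contains c
      (r, memo.insert (x, c) r)
    else if _hc : c > maxw then
      (false, memo.insert (x, c) false)
    else
      let nxt : List Int :=
        (if x - 2 ≥ 0 then [x - 2] else []) ++
        (if x - 3 ≥ 0 then [x - 3] else []) ++
        (if PySem.Int.floordiv x 2 ≥ 0 then [PySem.Int.floordiv x 2] else [])
      let p := fAltGoList maxw win nxt (c + 1) memo
      let r := if PySem.Int.mod c 2 ≠ PySem.Int.mod maxw 2 then p.1.any id else p.1.all id
      (r, p.2.insert (x, c) r)
termination_by ((maxw + 1 - c).toNat, 0)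
decreasing_by exact Prod.Lex.left _ _ (by omega)

-- the list comprehension [g(y, c+1) for y in nxt], threading the memo
def fAltGoList (maxw : Int) (win : List Int) (ys : List Int) (c : Int)
    (memo : PySem.Dict (Int × Int) Bool) : List Bool × PySem.Dict (Int × Int) Bool :=
  match ys with
  | [] => ([], memo)
  | y :: t =>
    let p := fAltGo maxw win y c memo
    let q := fAltGoList maxw win t c p.2
    (p.1 :: q.1, q.2)
termination_by ((maxw + 1 - c).toNat, ys.length + 1)
decreasing_by
  · exact Prod.Lex.right _ (by simp)
  · exact Prod.Lex.right _ (by simp)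
end

-- maxw = max(win) of Source B
def pymaxB (win : List Int) : Int := (PySem.List.max? win (fun y => y)).getD 0

def f_alt (x : Int) (c : Int) (win : List Int) : Bool :=
  (fAltGo (pymaxB win) win x c PySem.Dict.empty).1

-- ===== PRECONDITION & SPEC =====
-- Pre_f excludes (a) empty win, where Python A raises ValueError from max([]) whenever x ≠ 0 and
-- B's natural upfront max(win) raises ValueError unconditionally (including the x = 0 corner where
-- A happens to return False before reaching max); and (b) top-level calls with x ≠ 0 and
-- c > max(win), where A's 'return 0' yields an int, not a value of the declared return type bool
-- (B returns the Bool False there); and (c) inputs with both x > 400 and max(win) + 1 - c > 200,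
-- on which A never returns a value: its memo-less recursion either exceeds CPython's recursion
-- limit (RecursionError) or performs at least 10^49 recursive calls there, while B answers.
def Pre_f (x : Int) (c : Int) (win : List Int) : Prop :=
  win ≠ [] ∧ (x = 0 ∨ c ≤ pymaxI win) ∧ (x ≤ 400 ∨ pymaxI win + 1 - c ≤ 200)
instance (x : Int) (c : Int) (win : List Int) : Decidable (Pre_f x c win) := by unfold Pre_f; infer_instance
def pvWitness_f : Int × Int × List Int := (6, 0, [3, 5])

def Spec_f (x : Int) (c : Int) (win : List Int) (out : Bool) : Prop := out = f_alt x c win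
instance (x : Int) (c : Int) (win : List Int) (out : Bool) : Decidable (Spec_f x c win out) := by unfold Spec_f; infer_instance

-- ===== CLAIM (what is proved, stated in full; the proofs are below) =====
def Claim_equal_f : Prop := ∀ (x : Int) (c : Int) (win : List Int), Dom_f x c win → Pre_f x c win → Spec_f x c win (f x c win)

-- ===== LEMMAS AND PROOFS =====

-- every value stored in the memo is the corresponding value of A
def MemoOK (win : List Int) (m : PySem.Dict (Int × Int) Bool) : Prop :=
  ∀ p v, PySem.Dict.get? m p = some v → v = f p.1 p.2 win

lemma memoOK_insert {win : List Int} {m : PySem.Dict (Int × Int) Bool} {x c : Int} {r : Bool}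
    (hm : MemoOK win m) (hr : r = f x c win) : MemoOK win (m.insert (x, c) r) := by
  intro p v hv
  rw [PySem.Dict.get?_insert] at hv
  split at hv
  · rename_i hp; cases hv; subst hp; exact hr
  · exact hm p v hv

-- the three next states of A/B from a non-terminal position
def nxtList (x : Int) : List Int :=
  (if x - 2 ≥ 0 then [x - 2] else []) ++
  (if x - 3 ≥ 0 then [x - 3] else []) ++
  (if PySem.Int.floordiv x 2 ≥ 0 then [PySem.Int.floordiv x 2] else [])

lemma f_eq_zero (c : Int) (win : List Int) : f 0 c win = win.contains c := by
  rw [f]; simp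

lemma f_eq_high {x c : Int} {win : List Int} (hx : x ≠ 0) (hc : c > pymaxI win) :
    f x c win = false := by
  rw [f]; rw [if_neg hx, dif_pos hc]

lemma f_eq_rec {x c : Int} {win : List Int} (hx : x ≠ 0) (hc : ¬ c > pymaxI win) :
    f x c win =
      (if PySem.Int.mod c 2 ≠ PySem.Int.mod (pymaxI win) 2
        then ((nxtList x).map (fun y => f y (c + 1) win)).any id
        else ((nxtList x).map (fun y => f y (c + 1) win)).all id) := by
  rw [f]; rw [if_neg hx, dif_neg hc]
  simp only [nxtList, List.map_append, apply_ite (List.map (fun y => f y (c + 1) win)),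
    List.map_cons, List.map_nil]

lemma golist_ok (win : List Int) (n : Nat)
    (IH : ∀ (x c : Int) (m : PySem.Dict (Int × Int) Bool),
      (pymaxI win + 1 - c).toNat ≤ n → MemoOK win m →
      (fAltGo (pymaxI win) win x c m).1 = f x c win ∧
      MemoOK win (fAltGo (pymaxI win) win x c m).2) :
    ∀ (ys : List Int) (c : Int) (m : PySem.Dict (Int × Int) Bool),
      (pymaxI win + 1 - c).toNat ≤ n → MemoOK win m →
      (fAltGoList (pymaxI win) win ys c m).1 = ys.map (fun y => f y c win) ∧
      MemoOK win (fAltGoList (pymaxI win) win ys c m).2 := by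
  intro ys
  induction ys with
  | nil => intro c m hf hm; rw [fAltGoList]; simpa using hm
  | cons y t ih =>
    intro c m hf hm
    rw [fAltGoList]
    obtain ⟨h1, h2⟩ := IH y c m hf hm
    obtain ⟨h3, h4⟩ := ih c _ hf h2
    simp only [List.map_cons]
    exact ⟨by rw [h1, h3], h4⟩

lemma go_ok (win : List Int) : ∀ (fuel : Nat) (x c : Int) (m : PySem.Dict (Int × Int) Bool),
    (pymaxI win + 1 - c).toNat ≤ fuel → MemoOK win m →
    (fAltGo (pymaxI win) win x c m).1 = f x c win ∧
    MemoOK win (fAltGo (pymaxI win) win x c m).2 := by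
  intro fuel
  induction fuel with
  | zero =>
    intro x c m hf hm
    rw [fAltGo]
    cases hget : PySem.Dict.get? m (x, c) with
    | some v => simpa using ⟨hm _ _ hget, hm⟩
    | none =>
      simp only
      by_cases hx : x = 0
      · subst hx
        rw [if_pos rfl]
        exact ⟨(f_eq_zero c win).symm, memoOK_insert hm (f_eq_zero c win).symm⟩
      · rw [if_neg hx]
        have hc : c > pymaxI win := by omega
        rw [dif_pos hc]
        exact ⟨(f_eq_high hx hc).symm, memoOK_insert hm (f_eq_high hx hc).symm⟩
  | succ n ihn =>
    intro x c m hf hm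
    rw [fAltGo]
    cases hget : PySem.Dict.get? m (x, c) with
    | some v => simpa using ⟨hm _ _ hget, hm⟩
    | none =>
      simp only
      by_cases hx : x = 0
      · subst hx
        rw [if_pos rfl]
        exact ⟨(f_eq_zero c win).symm, memoOK_insert hm (f_eq_zero c win).symm⟩
      · rw [if_neg hx]
        by_cases hc : c > pymaxI win
        · rw [dif_pos hc]
          exact ⟨(f_eq_high hx hc).symm, memoOK_insert hm (f_eq_high hx hc).symm⟩
        · rw [dif_neg hc]
          have hf' : (pymaxI win + 1 - (c + 1)).toNat ≤ n := by omega
          obtain ⟨h1, h2⟩ := golist_ok win n ihn (nxtList x) (c + 1) m hf' hm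
          have hr : (if PySem.Int.mod c 2 ≠ PySem.Int.mod (pymaxI win) 2
              then (fAltGoList (pymaxI win) win (nxtList x) (c + 1) m).1.any id
              else (fAltGoList (pymaxI win) win (nxtList x) (c + 1) m).1.all id) = f x c win := by
            rw [h1, f_eq_rec hx hc]
          unfold nxtList at hr
          exact ⟨hr, memoOK_insert h2 hr⟩

-- ===== VERDICT =====
theorem f_spec : Claim_equal_f := by
  intro x c win _ _
  unfold Spec_f f_alt
  have hmx : pymaxB win = pymaxI win := rfl
  rw [hmx]
  have h := (go_ok win (pymaxI win + 1 - c).toNat x c PySem.Dict.empty (le_refl _)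
    (by intro p v hv; simp [PySem.Dict.get?_empty] at hv)).1
  exact h.symm
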